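-- pv_equiv track=rewrite | github.com/shubhamag91/poker_ai | code/scripts/report_postflop_hero_deeper_actions.py | extract_turn_action_lines
-- ===== SOURCE A (Python) =====
-- def extract_turn_action_lines(hand: str) -> list[str]:
--     lines = hand.splitlines()
--     start = None
--     for i, line in enumerate(lines):
--         if line.startswith("*** TURN ***"):
--             start = i + 1
--             break
--     if start is None:
--         return []
--
--     end = len(lines)
--     for i in range(start, len(lines)):
--         if lines[i].startswith("*** RIVER ***") or lines[i].startswith("*** SUMMARY ***"):
--             end = i
--             break
--     return [line.strip() for line in lines[start:end] if line.strip()]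
-- ===== SOURCE B (Python) =====
-- def extract_turn_action_lines(hand: str) -> list[str]:
--     out = []
--     collecting = False
--     for line in hand.splitlines():
--         if not collecting:
--             if line.startswith("*** TURN ***"):
--                 collecting = True
--         elif line.startswith("*** RIVER ***") or line.startswith("*** SUMMARY ***"):
--             break
--         else:
--             s = line.strip()
--             if s:
--                 out.append(s)
--     return out
-- ===== Notes on version B (the rewrite author's own statement) =====
-- stated objective: simpler
-- what changed: Replaces A's three passes (index search for the TURN marker, second index loop for the RIVER/SUMMARY end marker, then a slice-and-filter comprehension) with one pass over the lines using a collecting flag that appends stripped non-empty lines and breaks at an end marker.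
import Mathlib
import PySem

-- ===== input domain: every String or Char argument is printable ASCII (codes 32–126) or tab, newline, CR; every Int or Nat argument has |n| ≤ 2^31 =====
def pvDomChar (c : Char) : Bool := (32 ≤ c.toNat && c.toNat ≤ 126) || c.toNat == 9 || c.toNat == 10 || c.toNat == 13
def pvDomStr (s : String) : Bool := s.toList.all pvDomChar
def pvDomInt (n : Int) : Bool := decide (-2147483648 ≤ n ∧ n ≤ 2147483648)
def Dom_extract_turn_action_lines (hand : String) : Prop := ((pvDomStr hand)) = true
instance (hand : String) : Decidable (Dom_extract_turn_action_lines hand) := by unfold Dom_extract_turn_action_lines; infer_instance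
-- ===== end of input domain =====

-- B replaces A's three passes (find start marker, find end marker, slice-and-filter)
-- by one pass with a collecting flag; objective: simpler.

-- ===== PORT A =====
-- first loop: for i, line in enumerate(lines): if line.startswith("*** TURN ***"): start = i+1; break
def aFindStart : List String → Nat → Option Nat
  | [], _ => none
  | line :: rest, i =>
    if PySem.Str.startswith line "*** TURN ***" then some (i + 1)
    else aFindStart rest (i + 1)

-- second loop: for i in range(start, len(lines)): checks lines[i]; iterating lines[i] for i ≥ start
-- is scanning lines.drop start alongside the index i (exact, since start ≤ len(lines))
def aFindEnd : List String → Nat → Option Nat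
  | [], _ => none
  | line :: rest, i =>
    if PySem.Str.startswith line "*** RIVER ***" || PySem.Str.startswith line "*** SUMMARY ***"
    then some i
    else aFindEnd rest (i + 1)

def extract_turn_action_lines (hand : String) : List String :=
  let lines := PySem.Str.splitlines hand
  match aFindStart lines 0 with
  | none => []
  | some start =>
    let e := (aFindEnd (lines.drop start) start).getD lines.length
    -- lines[start:e] with 0 ≤ start ≤ e ≤ len(lines): exact as drop/take
    ((lines.drop start).take (e - start)).filterMap
      (fun line => let s := PySem.Str.strip line; if s = "" then none else some s)

-- ===== PORT B =====
def altGo : List String → Bool → List String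
  | [], _ => []
  | line :: rest, collecting =>
    if !collecting then
      if PySem.Str.startswith line "*** TURN ***" then altGo rest true
      else altGo rest false
    else if PySem.Str.startswith line "*** RIVER ***" || PySem.Str.startswith line "*** SUMMARY ***"
    then []
    else
      let s := PySem.Str.strip line
      if s = "" then altGo rest collecting else s :: altGo rest collecting

def extract_turn_action_lines_alt (hand : String) : List String :=
  altGo (PySem.Str.splitlines hand) false

-- ===== PRECONDITION & SPEC =====
def Spec_extract_turn_action_lines (hand : String) (out : List String) : Prop := out = extract_turn_action_lines_alt hand
instance (hand : String) (out : List String) : Decidable (Spec_extract_turn_action_lines hand out) := by unfold Spec_extract_turn_action_lines; infer_instance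

-- ===== CLAIM (what is proved, stated in full; the proofs are below) =====
def Claim_equal_extract_turn_action_lines : Prop := ∀ (hand : String), Dom_extract_turn_action_lines hand → Spec_extract_turn_action_lines hand (extract_turn_action_lines hand)

-- ===== LEMMAS AND PROOFS =====

def pvStripF (line : String) : Option String :=
  let s := PySem.Str.strip line; if s = "" then none else some s

lemma aFindEnd_shift (ls : List String) (i : Nat) :
    aFindEnd ls i = (aFindEnd ls 0).map (fun k => k + i) := by
  induction ls generalizing i with
  | nil => simp [aFindEnd]
  | cons l rest ih =>
    simp only [aFindEnd]
    split
    · simp [Nat.add_comm]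
    · rw [ih (i + 1), ih 1]
      cases aFindEnd rest 0
      · simp
      · simp; omega

lemma aFindStart_shift (ls : List String) (i : Nat) :
    aFindStart ls i = (aFindStart ls 0).map (fun k => k + i) := by
  induction ls generalizing i with
  | nil => simp [aFindStart]
  | cons l rest ih =>
    simp only [aFindStart]
    split
    · simp [Nat.add_comm]
    · rw [ih (i + 1), ih 1]
      cases aFindStart rest 0
      · simp
      · simp; omega

-- the collecting phase of B equals A's take-until-end-marker then filter
lemma altGo_true (ls : List String) :
    altGo ls true = (ls.take ((aFindEnd ls 0).getD ls.length)).filterMap pvStripF := by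
  induction ls with
  | nil => simp [altGo]
  | cons l rest ih =>
    by_cases hm : (PySem.Str.startswith l "*** RIVER ***" || PySem.Str.startswith l "*** SUMMARY ***") = true
    · simp only [altGo, aFindEnd, Bool.not_true, Bool.false_eq_true, if_false, hm, if_true]
      simp
    · simp only [altGo, aFindEnd, Bool.not_true, Bool.false_eq_true, if_false]
      rw [if_neg hm, if_neg hm]
      rw [ih, aFindEnd_shift rest 1]
      cases hk : aFindEnd rest 0 with
      | none =>
          simp only [Option.map_none, Option.getD_none, List.length_cons, List.take_succ_cons,
            List.filterMap_cons, pvStripF]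
          split <;> rfl
      | some k =>
          simp only [Option.map_some, Option.getD_some, List.take_succ_cons,
            List.filterMap_cons, pvStripF]
          split <;> rfl

-- A's whole body on a line list, to do induction on
def aBody (lines : List String) : List String :=
  match aFindStart lines 0 with
  | none => []
  | some start =>
    let e := (aFindEnd (lines.drop start) start).getD lines.length
    ((lines.drop start).take (e - start)).filterMap pvStripF

lemma aBody_eq (hand : String) :
    extract_turn_action_lines hand = aBody (PySem.Str.splitlines hand) := by
  simp [extract_turn_action_lines, aBody, pvStripF]

lemma main_lemma (ls : List String) : aBody ls = altGo ls false := by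
  induction ls with
  | nil => simp [aBody, aFindStart, altGo]
  | cons l rest ih =>
    by_cases h : PySem.Str.startswith l "*** TURN ***" = true
    · -- collection starts right after l
      simp only [aBody, aFindStart, h, if_pos, altGo, Bool.not_false,
        List.drop_succ_cons, List.drop_zero]
      rw [altGo_true, aFindEnd_shift rest 1]
      cases hk : aFindEnd rest 0 with
      | none => simp
      | some k => simp
    · -- l is skipped by both
      simp only [aBody, aFindStart, h, if_neg, Bool.false_eq_true, not_false_iff, altGo,
        Bool.not_false, if_true]
      rw [aFindStart_shift rest 1, ← ih]
      simp only [aBody]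
      cases hs : aFindStart rest 0 with
      | none => simp
      | some s =>
          simp only [Option.map_some, Option.getD, List.drop_succ_cons]
          rw [aFindEnd_shift (rest.drop s) s, aFindEnd_shift (rest.drop s) (s + 1)]
          cases hk : aFindEnd (rest.drop s) 0 with
          | none =>
              simp only [Option.map_none, List.length_cons]
              have he : rest.length + 1 - (s + 1) = rest.length - s := by omega
              rw [he]
          | some k =>
              simp only [Option.map_some, Option.getD]
              have he : k + (s + 1) - (s + 1) = k + s - s := by omega
              rw [he]

-- ===== VERDICT (by name: the statement is the Claim_ definition above) =====
theorem extract_turn_action_lines_spec : Claim_equal_extract_turn_action_lines := by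
  intro hand _
  unfold Spec_extract_turn_action_lines extract_turn_action_lines_alt
  rw [aBody_eq, main_lemma]
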